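-- pv_equiv track=rewrite | github.com/QuNB-Repo/DLCheM | 1-latentspace_extract_analyze/analysis_tools/utils/utils_fgtransform2.py | delete_connected_atom_and_connections
-- ===== SOURCE A (Python) =====
-- def delete_atom_connections(mol,targetidx,tag):
--
--     new_mol = ''
--     new_nbridxs = []
--     for line_index, each_line in enumerate(mol.split('\n')):
--
--         # THE TARGET ATOM SO THAT LATER YOU CAN USE THE  TO PUT THE TARGET
--         #TARGET ATOM FIRST IN THE XYZ... SO THAT IT CAN BE FOUND IN EMBEDDING DIFF
--         if tag == True:
--             if line_index == 3 + targetidx: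
--                 each_line = each_line.replace(each_line,'TAG ' + each_line)
--
--         if line_index > 3 + targetidx:
--             if str(targetidx) in each_line[0:7]:
--
--                 if ' ' +str(targetidx)+' ' in each_line[0:4]:
--                     new_nbridxs.append(int(each_line[4:7]))
--                     each_line = each_line.replace(each_line,'')
--
--                 if ' ' +str(targetidx)+' ' in each_line[4:7]:
--                     new_nbridxs.append(int(each_line[0:4]))
--                     each_line = each_line.replace(each_line,'')
--
--         new_mol = new_mol + each_line + '\n'
--
--     return new_mol, new_nbridxs
--
-- def delete_connected_atom_and_connections(mol,targetidx):
--     new_mol = ''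
--     for line_index, each_line in enumerate(mol.split('\n')):
--         if line_index == 3 + targetidx:
--             each_line = each_line.replace(each_line,'')
--
--         new_mol = new_mol + each_line + '\n'
--
--     new_mol, new_nbridxs = delete_atom_connections(new_mol,targetidx,tag=False)
--
--     return new_mol, new_nbridxs
-- ===== SOURCE B (Python) =====
-- def delete_connected_atom_and_connections(mol, targetidx):
--     # Single pass over mol.split('\n'), inlining the helper; the final extra
--     # '\n' reproduces the empty last piece of A's intermediate re-split.
--     t = str(targetidx)
--     pieces = []
--     new_nbridxs = []
--     for line_index, line in enumerate(mol.split('\n')):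
--         if line_index == 3 + targetidx:
--             line = ''
--         elif line_index > 3 + targetidx and t in line[0:7]:
--             if ' ' + t + ' ' in line[0:4]:
--                 new_nbridxs.append(int(line[4:7]))
--                 line = ''
--             elif ' ' + t + ' ' in line[4:7]:
--                 new_nbridxs.append(int(line[0:4]))
--                 line = ''
--         pieces.append(line)
--     pieces.append('')
--     return '\n'.join(pieces) + '\n', new_nbridxs
-- ===== Notes on version B (the rewrite author's own statement) =====
-- stated objective: simpler
-- what changed: B replaces A's two-phase design (blank the target line, rebuild the whole string, re-split it, then scan again for connection lines) with a single pass over mol.split(' ') that decides each line's fate directly, collecting pieces and joining once at the end (with the extra trailing ' ' that A's re-split of the rebuilt string produces).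
import Mathlib
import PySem

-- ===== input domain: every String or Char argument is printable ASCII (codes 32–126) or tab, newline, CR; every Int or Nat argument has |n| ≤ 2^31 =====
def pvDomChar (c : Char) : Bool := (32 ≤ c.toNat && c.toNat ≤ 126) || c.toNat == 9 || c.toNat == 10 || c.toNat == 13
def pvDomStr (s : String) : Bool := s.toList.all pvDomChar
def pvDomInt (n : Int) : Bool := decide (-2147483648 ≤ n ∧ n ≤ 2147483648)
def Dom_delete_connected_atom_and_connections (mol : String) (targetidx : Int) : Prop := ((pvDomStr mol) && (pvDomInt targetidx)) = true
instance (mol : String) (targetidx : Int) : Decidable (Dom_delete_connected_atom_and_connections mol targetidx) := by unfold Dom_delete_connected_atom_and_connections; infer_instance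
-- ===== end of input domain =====

-- B replaces A's two passes (blank the atom line, rebuild the string, re-split it, scan again for
-- connection lines) by ONE pass over mol.split('\n') that decides each line's fate directly;
-- objective: simpler.

-- ===== PORT A =====
-- A-side helper delete_atom_connections(mol, targetidx, tag); strings are carried as List Char
-- (the outer port converts at entry/exit).  'each_line.replace(each_line, x)' is ported exactly
-- as PySem.Chars.replace each_line each_line x.  int(...) is ported as ofChars? with .getD 0;
-- Python raises ValueError exactly where ofChars? is none, which Pre_ excludes.
def delete_atom_connections (mol : List Char) (targetidx : Int) (tag : Bool) : List Char × List Int :=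
  (PySem.List.enumerate ((PySem.Chars.split? mol ['\n']).getD [])).foldl
    (fun (st : List Char × List Int) (p : Int × List Char) =>
      let line1 : List Char :=
        if tag = true ∧ p.1 = 3 + targetidx then
          PySem.Chars.replace p.2 p.2 (['T','A','G',' '] ++ p.2)
        else p.2
      let r : List Char × List Int :=
        if p.1 > 3 + targetidx then
          if PySem.Chars.isIn (PySem.Int.toChars targetidx) (PySem.List.slice line1 (some 0) (some 7)) = true then
            let r1 : List Char × List Int :=
              if PySem.Chars.isIn (' ' :: (PySem.Int.toChars targetidx ++ [' '])) (PySem.List.slice line1 (some 0) (some 4)) = true then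
                (PySem.Chars.replace line1 line1 [],
                 st.2 ++ [(PySem.Int.ofChars? (PySem.List.slice line1 (some 4) (some 7))).getD 0])
              else (line1, st.2)
            if PySem.Chars.isIn (' ' :: (PySem.Int.toChars targetidx ++ [' '])) (PySem.List.slice r1.1 (some 4) (some 7)) = true then
              (PySem.Chars.replace r1.1 r1.1 [],
               r1.2 ++ [(PySem.Int.ofChars? (PySem.List.slice r1.1 (some 0) (some 4))).getD 0])
            else r1
          else (line1, st.2)
        else (line1, st.2)
      (st.1 ++ r.1 ++ ['\n'], r.2))
    ([], [])

def delete_connected_atom_and_connections (mol : String) (targetidx : Int) : String × List Int :=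
  let new_mol :=
    (PySem.List.enumerate ((PySem.Chars.split? mol.toList ['\n']).getD [])).foldl
      (fun (acc : List Char) (p : Int × List Char) =>
        let line := if p.1 = 3 + targetidx then PySem.Chars.replace p.2 p.2 [] else p.2
        acc ++ line ++ ['\n'])
      []
  let r := delete_atom_connections new_mol targetidx false
  (String.mk r.1, r.2)

-- ===== PORT B =====
-- single pass over mol.split('\n'); pieces are collected and joined once at the end,
-- with the extra '' piece plus final '\n' of Source B
def delete_connected_atom_and_connections_alt (mol : String) (targetidx : Int) : String × List Int :=
  let t := PySem.Int.toChars targetidx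
  let r :=
    (PySem.List.enumerate ((PySem.Chars.split? mol.toList ['\n']).getD [])).foldl
      (fun (st : List (List Char) × List Int) (p : Int × List Char) =>
        if p.1 = 3 + targetidx then (st.1 ++ [([] : List Char)], st.2)
        else if p.1 > 3 + targetidx ∧ PySem.Chars.isIn t (PySem.List.slice p.2 (some 0) (some 7)) = true then
          if PySem.Chars.isIn (' ' :: (t ++ [' '])) (PySem.List.slice p.2 (some 0) (some 4)) = true then
            (st.1 ++ [[]], st.2 ++ [(PySem.Int.ofChars? (PySem.List.slice p.2 (some 4) (some 7))).getD 0])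
          else if PySem.Chars.isIn (' ' :: (t ++ [' '])) (PySem.List.slice p.2 (some 4) (some 7)) = true then
            (st.1 ++ [[]], st.2 ++ [(PySem.Int.ofChars? (PySem.List.slice p.2 (some 0) (some 4))).getD 0])
          else (st.1 ++ [p.2], st.2)
        else (st.1 ++ [p.2], st.2))
      ([], [])
  (String.mk (PySem.Chars.join ['\n'] (r.1 ++ [[]]) ++ ['\n']), r.2)

-- ===== PRECONDITION & SPEC =====
-- Pre_ excludes exactly the inputs on which A raises ValueError: a line after the target line
-- whose matched 3-char/4-char field is not int()-parsable.
def Pre_delete_connected_atom_and_connections (mol : String) (targetidx : Int) : Prop :=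
  ∀ p ∈ PySem.List.enumerate ((PySem.Chars.split? mol.toList ['\n']).getD []),
    p.1 > 3 + targetidx →
      (PySem.Chars.isIn (' ' :: (PySem.Int.toChars targetidx ++ [' '])) (PySem.List.slice p.2 (some 0) (some 4)) = true →
        (PySem.Int.ofChars? (PySem.List.slice p.2 (some 4) (some 7))).isSome = true) ∧
      (PySem.Chars.isIn (' ' :: (PySem.Int.toChars targetidx ++ [' '])) (PySem.List.slice p.2 (some 0) (some 4)) = false →
       PySem.Chars.isIn (' ' :: (PySem.Int.toChars targetidx ++ [' '])) (PySem.List.slice p.2 (some 4) (some 7)) = true →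
        (PySem.Int.ofChars? (PySem.List.slice p.2 (some 0) (some 4))).isSome = true)
instance (mol : String) (targetidx : Int) : Decidable (Pre_delete_connected_atom_and_connections mol targetidx) := by
  unfold Pre_delete_connected_atom_and_connections; infer_instance

def pvWitness_delete_connected_atom_and_connections : String × Int := ("a\nb\nc\nd\n  1  2", 1)

def Spec_delete_connected_atom_and_connections (mol : String) (targetidx : Int) (out : String × List Int) : Prop := out = delete_connected_atom_and_connections_alt mol targetidx
instance (mol : String) (targetidx : Int) (out : String × List Int) : Decidable (Spec_delete_connected_atom_and_connections mol targetidx out) := by unfold Spec_delete_connected_atom_and_connections; infer_instance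

-- ===== CLAIM (what is proved, stated in full; the proofs are below) =====
def Claim_equal_delete_connected_atom_and_connections : Prop := ∀ (mol : String) (targetidx : Int), Dom_delete_connected_atom_and_connections mol targetidx → Pre_delete_connected_atom_and_connections mol targetidx → Spec_delete_connected_atom_and_connections mol targetidx (delete_connected_atom_and_connections mol targetidx)

-- ===== LEMMAS AND PROOFS =====

-- structural model of s.split('\n')
def splitNLp (pre : List Char) : List Char → List (List Char)
  | [] => [pre]
  | c :: r => if c = '\n' then pre :: splitNLp [] r else splitNLp (pre ++ [c]) r

theorem splitOn_go_eq : ∀ (l : List Char) (fuel : Nat) (cur : List Char) (acc : List (List Char)),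
    l.length < fuel →
    PySem.Chars.splitOn.go ['\n'] fuel l cur acc = acc.reverse ++ splitNLp cur.reverse l := by
  intro l
  induction l with
  | nil =>
    intro fuel cur acc h
    cases fuel with
    | zero => omega
    | succ f => rw [PySem.Chars.splitOn.go.eq_def]; simp [splitNLp]
  | cons c rest ih =>
    intro fuel cur acc h
    cases fuel with
    | zero => simp at h
    | succ f =>
      rw [PySem.Chars.splitOn.go.eq_def]
      by_cases hc : c = '\n'
      · subst hc
        have hpre : List.isPrefixOf ['\n'] ('\n' :: rest) = true := by
          simp
        simp only [hpre, if_true]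
        rw [show List.drop ['\n'].length ('\n' :: rest) = rest by simp]
        rw [ih f [] (cur.reverse :: acc) (by simpa using h)]
        simp [splitNLp]
      · have hpre : List.isPrefixOf ['\n'] (c :: rest) = false := by
          simp [List.isPrefixOf, Ne.symm hc]
        simp only [hpre, Bool.false_eq_true, if_false]
        rw [ih f (c :: cur) acc (by simpa using h)]
        simp [splitNLp, hc]

theorem splitOn_eq_splitNLp (s : List Char) : PySem.Chars.splitOn s ['\n'] = splitNLp [] s := by
  unfold PySem.Chars.splitOn
  rw [splitOn_go_eq s (s.length + 1) [] [] (by omega)]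
  simp

theorem splitNLp_append (l : List Char) : ∀ (pre r : List Char), '\n' ∉ l →
    splitNLp pre (l ++ r) = splitNLp (pre ++ l) r := by
  induction l with
  | nil => intro pre r _; simp
  | cons c t ih =>
    intro pre r h
    have hc : c ≠ '\n' := fun hc => h (by simp [hc])
    simp only [List.cons_append, splitNLp, hc, if_false]
    rw [ih (pre ++ [c]) r (fun hm => h (by simp [hm]))]
    simp

theorem splitNLp_flatten : ∀ (ls : List (List Char)), (∀ l ∈ ls, '\n' ∉ l) →
    splitNLp [] ((ls.map (fun l => l ++ ['\n'])).flatten) = ls ++ [[]] := by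
  intro ls
  induction ls with
  | nil => intro _; simp [splitNLp]
  | cons l rest ih =>
    intro h
    simp only [List.map_cons, List.flatten_cons, List.append_assoc]
    rw [splitNLp_append l [] (['\n'] ++ (rest.map (fun l => l ++ ['\n'])).flatten) (h l (by simp))]
    simp only [List.nil_append, List.singleton_append, splitNLp]
    rw [ih (fun x hx => h x (by simp [hx]))]
    simp

theorem mem_splitNLp_no_nl : ∀ (l pre : List Char), '\n' ∉ pre →
    ∀ p ∈ splitNLp pre l, '\n' ∉ p := by
  intro l
  induction l with
  | nil => intro pre h p hp; simp [splitNLp] at hp; subst hp; exact h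
  | cons c t ih =>
    intro pre h p hp
    by_cases hc : c = '\n'
    · subst hc
      simp only [splitNLp] at hp
      rcases List.mem_cons.mp hp with rfl | hp'
      · exact h
      · exact ih [] (by simp) p hp'
    · simp only [splitNLp, hc, if_false] at hp
      exact ih (pre ++ [c]) (by simp [h, Ne.symm hc]) p hp

theorem enum_map {α β : Type} (f : α → β) : ∀ (xs : List α) (s : Int),
    PySem.List.enumerate (xs.map f) s = (PySem.List.enumerate xs s).map (fun p => (p.1, f p.2)) := by
  intro xs
  induction xs with
  | nil => intro s; simp [PySem.List.enumerate]
  | cons x t ih => intro s; simp [PySem.List.enumerate_cons, ih]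

theorem enum_enum {α : Type} : ∀ (xs : List α) (s : Int),
    PySem.List.enumerate (PySem.List.enumerate xs s) s
      = (PySem.List.enumerate xs s).map (fun p => (p.1, p)) := by
  intro xs
  induction xs with
  | nil => intro s; simp [PySem.List.enumerate]
  | cons x t ih => intro s; simp [PySem.List.enumerate_cons, ih]

theorem join_append_nil : ∀ (xs : List (List Char)),
    PySem.Chars.join ['\n'] (xs ++ [[]]) = (xs.map (fun l => l ++ ['\n'])).flatten := by
  intro xs
  induction xs with
  | nil => simp [PySem.Chars.join, List.intercalate]
  | cons x t ih =>
    cases t with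
    | nil => simp [PySem.Chars.join, List.intercalate, List.intersperse_cons₂, List.intersperse_single]
    | cons y u =>
      simp only [PySem.Chars.join, List.intercalate] at ih ⊢
      simp only [List.cons_append, List.intersperse_cons₂, List.flatten_cons, List.map_cons] at ih ⊢
      rw [ih]
      simp

theorem replace_self (l x : List Char) : PySem.Chars.replace l l x = x := by
  cases l with
  | nil => simp [PySem.Chars.replace]
  | cons c t =>
    simp only [PySem.Chars.replace, List.isEmpty_cons, List.length_cons]
    rw [PySem.Chars.replace.go.eq_def]
    have hpre : (c :: t).isPrefixOf (c :: t) = true := by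
      simp [List.isPrefixOf_iff_prefix]
    simp only [hpre, if_true, Bool.false_eq_true, if_false, List.length_cons, List.drop_succ_cons,
      List.drop_length, List.append_nil]
    rw [PySem.Chars.replace.go.eq_def]
    cases t <;> simp

theorem toDigitsCore_ne_nil : ∀ (b f n : Nat) (l : List Char), l ≠ [] → Nat.toDigitsCore b f n l ≠ [] := by
  intro b f
  induction f with
  | zero => intro n l h; simpa [Nat.toDigitsCore] using h
  | succ f ih =>
    intro n l h
    simp only [Nat.toDigitsCore]
    split
    · simp
    · exact ih _ _ (by simp)

theorem toChars_ne_nil (n : Int) : PySem.Int.toChars n ≠ [] := by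
  unfold PySem.Int.toChars
  split
  · simp
  · unfold Nat.toDigits
    simp only [Nat.toDigitsCore]
    split
    · simp
    · exact toDigitsCore_ne_nil _ _ _ _ (by simp)

theorem isIn_ne_nil (sub : List Char) (h : sub ≠ []) : PySem.Chars.isIn sub [] = false := by
  cases hb : PySem.Chars.isIn sub [] with
  | false => rfl
  | true => exact absurd (List.eq_nil_of_infix_nil ((PySem.Chars.isIn_iff_infix sub []).mp hb)) h

-- the per-line outcome shared by both ports: the piece(s) and neighbour contribution of one line
def pvOne (t : Int) (p : Int × List Char) : List (List Char) × List Int :=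
  if p.1 = 3 + t then ([[]], [])
  else if p.1 > 3 + t ∧ PySem.Chars.isIn (PySem.Int.toChars t) (PySem.List.slice p.2 (some 0) (some 7)) = true then
    if PySem.Chars.isIn (' ' :: (PySem.Int.toChars t ++ [' '])) (PySem.List.slice p.2 (some 0) (some 4)) = true then
      ([[]], [(PySem.Int.ofChars? (PySem.List.slice p.2 (some 4) (some 7))).getD 0])
    else if PySem.Chars.isIn (' ' :: (PySem.Int.toChars t ++ [' '])) (PySem.List.slice p.2 (some 4) (some 7)) = true then
      ([[]], [(PySem.Int.ofChars? (PySem.List.slice p.2 (some 0) (some 4))).getD 0])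
    else ([p.2], [])
  else ([p.2], [])

def pvProc (t : Int) : List (Int × List Char) → List (List Char) × List Int
  | [] => ([], [])
  | p :: rest => ((pvOne t p).1 ++ (pvProc t rest).1, (pvOne t p).2 ++ (pvProc t rest).2)

def pvStepB (t : Int) (st : List (List Char) × List Int) (p : Int × List Char) : List (List Char) × List Int :=
  if p.1 = 3 + t then (st.1 ++ [([] : List Char)], st.2)
  else if p.1 > 3 + t ∧ PySem.Chars.isIn (PySem.Int.toChars t) (PySem.List.slice p.2 (some 0) (some 7)) = true then
    if PySem.Chars.isIn (' ' :: (PySem.Int.toChars t ++ [' '])) (PySem.List.slice p.2 (some 0) (some 4)) = true then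
      (st.1 ++ [[]], st.2 ++ [(PySem.Int.ofChars? (PySem.List.slice p.2 (some 4) (some 7))).getD 0])
    else if PySem.Chars.isIn (' ' :: (PySem.Int.toChars t ++ [' '])) (PySem.List.slice p.2 (some 4) (some 7)) = true then
      (st.1 ++ [[]], st.2 ++ [(PySem.Int.ofChars? (PySem.List.slice p.2 (some 0) (some 4))).getD 0])
    else (st.1 ++ [p.2], st.2)
  else (st.1 ++ [p.2], st.2)

def pvStepA (t : Int) (st : List Char × List Int) (p : Int × List Char) : List Char × List Int :=
  let line1 : List Char :=
    if (false : Bool) = true ∧ p.1 = 3 + t then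
      PySem.Chars.replace p.2 p.2 (['T','A','G',' '] ++ p.2)
    else p.2
  let r : List Char × List Int :=
    if p.1 > 3 + t then
      if PySem.Chars.isIn (PySem.Int.toChars t) (PySem.List.slice line1 (some 0) (some 7)) = true then
        let r1 : List Char × List Int :=
          if PySem.Chars.isIn (' ' :: (PySem.Int.toChars t ++ [' '])) (PySem.List.slice line1 (some 0) (some 4)) = true then
            (PySem.Chars.replace line1 line1 [],
             st.2 ++ [(PySem.Int.ofChars? (PySem.List.slice line1 (some 4) (some 7))).getD 0])
          else (line1, st.2)
        if PySem.Chars.isIn (' ' :: (PySem.Int.toChars t ++ [' '])) (PySem.List.slice r1.1 (some 4) (some 7)) = true then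
          (PySem.Chars.replace r1.1 r1.1 [],
           r1.2 ++ [(PySem.Int.ofChars? (PySem.List.slice r1.1 (some 0) (some 4))).getD 0])
        else r1
      else (line1, st.2)
    else (line1, st.2)
  (st.1 ++ r.1 ++ ['\n'], r.2)

-- A's per-line outcome on the (already possibly blanked) line of the rebuilt string
def pvOneA (t : Int) (p : Int × List Char) : List Char × List Int :=
  if p.1 > 3 + t ∧ PySem.Chars.isIn (PySem.Int.toChars t) (PySem.List.slice p.2 (some 0) (some 7)) = true then
    if PySem.Chars.isIn (' ' :: (PySem.Int.toChars t ++ [' '])) (PySem.List.slice p.2 (some 0) (some 4)) = true then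
      ([], [(PySem.Int.ofChars? (PySem.List.slice p.2 (some 4) (some 7))).getD 0])
    else if PySem.Chars.isIn (' ' :: (PySem.Int.toChars t ++ [' '])) (PySem.List.slice p.2 (some 4) (some 7)) = true then
      ([], [(PySem.Int.ofChars? (PySem.List.slice p.2 (some 0) (some 4))).getD 0])
    else (p.2, [])
  else (p.2, [])

theorem isIn_pad_nil (t : Int) :
    PySem.Chars.isIn (' ' :: (PySem.Int.toChars t ++ [' '])) ([] : List Char) = false :=
  isIn_ne_nil _ (by simp)

theorem stepB_eval (t : Int) (st : List (List Char) × List Int) (p : Int × List Char) :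
    pvStepB t st p = (st.1 ++ (pvOne t p).1, st.2 ++ (pvOne t p).2) := by
  unfold pvStepB pvOne
  simp only [PySem.List.slice_zero_start]
  by_cases h1 : p.1 = 3 + t
  · simp [h1]
  · simp only [if_neg h1]
    by_cases h2 : p.1 > 3 + t ∧ PySem.Chars.isIn (PySem.Int.toChars t) (PySem.List.slice p.2 none (some 7)) = true
    · simp only [if_pos h2]
      by_cases h3 : PySem.Chars.isIn (' ' :: (PySem.Int.toChars t ++ [' '])) (PySem.List.slice p.2 none (some 4)) = true
      · simp [h3]
      · simp only [if_neg h3]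
        by_cases h4 : PySem.Chars.isIn (' ' :: (PySem.Int.toChars t ++ [' '])) (PySem.List.slice p.2 (some 4) (some 7)) = true
        · simp [h4]
        · simp [h4]
    · simp [h2]

theorem stepA_eval (t : Int) (st : List Char × List Int) (p : Int × List Char) :
    pvStepA t st p = (st.1 ++ (pvOneA t p).1 ++ ['\n'], st.2 ++ (pvOneA t p).2) := by
  unfold pvStepA pvOneA
  simp only [Bool.false_eq_true, false_and, if_false]
  simp only [PySem.List.slice_zero_start]
  by_cases hg : p.1 > 3 + t
  · simp only [if_pos hg]
    by_cases h2 : PySem.Chars.isIn (PySem.Int.toChars t) (PySem.List.slice p.2 none (some 7)) = true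
    · simp only [if_pos h2]
      by_cases h3 : PySem.Chars.isIn (' ' :: (PySem.Int.toChars t ++ [' '])) (PySem.List.slice p.2 none (some 4)) = true
      · -- the first check blanks the line; the second check then looks at the empty line and fails
        simp only [if_pos h3, replace_self]
        have hsl : PySem.List.slice ([] : List Char) (some 4) (some 7) = [] := by
          simp [PySem.List.slice]
        simp [hsl, isIn_pad_nil t, hg, h2]
      · simp only [if_neg h3]
        by_cases h4 : PySem.Chars.isIn (' ' :: (PySem.Int.toChars t ++ [' '])) (PySem.List.slice p.2 (some 4) (some 7)) = true
        · simp [h4, replace_self, hg, h2]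
        · simp [h4, hg, h2]
    · simp [h2]
  · simp [hg]

-- A's per-line outcome on the blanked line agrees with B's per-line outcome on the original line
theorem oneA_eq_one (t : Int) (p : Int × List Char) :
    pvOneA t (p.1, if p.1 = 3 + t then ([] : List Char) else p.2)
      = ((pvOne t p).1.flatten, (pvOne t p).2) := by
  unfold pvOneA pvOne
  simp only [PySem.List.slice_zero_start]
  by_cases h1 : p.1 = 3 + t
  · simp [h1]
  · simp only [if_neg h1]
    by_cases h2 : p.1 > 3 + t ∧ PySem.Chars.isIn (PySem.Int.toChars t) (PySem.List.slice p.2 none (some 7)) = true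
    · simp only [if_pos h2]
      by_cases h3 : PySem.Chars.isIn (' ' :: (PySem.Int.toChars t ++ [' '])) (PySem.List.slice p.2 none (some 4)) = true
      · simp [h3]
      · simp only [if_neg h3]
        by_cases h4 : PySem.Chars.isIn (' ' :: (PySem.Int.toChars t ++ [' '])) (PySem.List.slice p.2 (some 4) (some 7)) = true
        · simp [h4]
        · simp [h4]
    · simp [h2]

theorem foldB_eq (t : Int) : ∀ (l : List (Int × List Char)) (accP : List (List Char)) (accN : List Int),
    l.foldl
      (fun (st : List (List Char) × List Int) (p : Int × List Char) =>
        if p.1 = 3 + t then (st.1 ++ [([] : List Char)], st.2)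
        else if p.1 > 3 + t ∧ PySem.Chars.isIn (PySem.Int.toChars t) (PySem.List.slice p.2 (some 0) (some 7)) = true then
          if PySem.Chars.isIn (' ' :: (PySem.Int.toChars t ++ [' '])) (PySem.List.slice p.2 (some 0) (some 4)) = true then
            (st.1 ++ [[]], st.2 ++ [(PySem.Int.ofChars? (PySem.List.slice p.2 (some 4) (some 7))).getD 0])
          else if PySem.Chars.isIn (' ' :: (PySem.Int.toChars t ++ [' '])) (PySem.List.slice p.2 (some 4) (some 7)) = true then
            (st.1 ++ [[]], st.2 ++ [(PySem.Int.ofChars? (PySem.List.slice p.2 (some 0) (some 4))).getD 0])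
          else (st.1 ++ [p.2], st.2)
        else (st.1 ++ [p.2], st.2))
      (accP, accN)
    = (accP ++ (pvProc t l).1, accN ++ (pvProc t l).2) := by
  intro l
  suffices h : ∀ (l : List (Int × List Char)) (accP : List (List Char)) (accN : List Int),
      List.foldl (pvStepB t) (accP, accN) l = (accP ++ (pvProc t l).1, accN ++ (pvProc t l).2) by
    exact fun accP accN => h l accP accN
  intro l
  induction l with
  | nil => intro accP accN; simp [pvProc]
  | cons p rest ih =>
    intro accP accN
    rw [List.foldl_cons, stepB_eval t (accP, accN) p, ih]
    simp [pvProc]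

theorem pvOne_singleton (t : Int) (p : Int × List Char) : ∃ y, (pvOne t p).1 = [y] := by
  unfold pvOne; split_ifs <;> exact ⟨_, rfl⟩

theorem foldA_eq (t : Int) : ∀ (l : List (Int × List Char)) (accS : List Char) (accN : List Int),
    (l.map (fun p => (p.1, if p.1 = 3 + t then ([] : List Char) else p.2))).foldl
      (fun (st : List Char × List Int) (p : Int × List Char) =>
        let line1 : List Char :=
          if (false : Bool) = true ∧ p.1 = 3 + t then
            PySem.Chars.replace p.2 p.2 (['T','A','G',' '] ++ p.2)
          else p.2
        let r : List Char × List Int :=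
          if p.1 > 3 + t then
            if PySem.Chars.isIn (PySem.Int.toChars t) (PySem.List.slice line1 (some 0) (some 7)) = true then
              let r1 : List Char × List Int :=
                if PySem.Chars.isIn (' ' :: (PySem.Int.toChars t ++ [' '])) (PySem.List.slice line1 (some 0) (some 4)) = true then
                  (PySem.Chars.replace line1 line1 [],
                   st.2 ++ [(PySem.Int.ofChars? (PySem.List.slice line1 (some 4) (some 7))).getD 0])
                else (line1, st.2)
              if PySem.Chars.isIn (' ' :: (PySem.Int.toChars t ++ [' '])) (PySem.List.slice r1.1 (some 4) (some 7)) = true then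
                (PySem.Chars.replace r1.1 r1.1 [],
                 r1.2 ++ [(PySem.Int.ofChars? (PySem.List.slice r1.1 (some 0) (some 4))).getD 0])
              else r1
            else (line1, st.2)
          else (line1, st.2)
        (st.1 ++ r.1 ++ ['\n'], r.2))
      (accS, accN)
    = (accS ++ ((pvProc t l).1.map (fun l => l ++ ['\n'])).flatten, accN ++ (pvProc t l).2) := by
  intro l
  suffices h : ∀ (l : List (Int × List Char)) (accS : List Char) (accN : List Int),
      List.foldl (pvStepA t) (accS, accN)
        (l.map (fun p => (p.1, if p.1 = 3 + t then ([] : List Char) else p.2)))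
      = (accS ++ ((pvProc t l).1.map (fun l => l ++ ['\n'])).flatten, accN ++ (pvProc t l).2) by
    exact fun accS accN => h l accS accN
  intro l
  induction l with
  | nil => intro accS accN; simp [pvProc]
  | cons p rest ih =>
    intro accS accN
    rw [List.map_cons, List.foldl_cons,
        stepA_eval t (accS, accN) (p.1, if p.1 = 3 + t then ([] : List Char) else p.2),
        oneA_eq_one t p, ih]
    obtain ⟨y, hy⟩ := pvOne_singleton t p
    simp [pvProc, hy]

-- first pass of A: the rebuilt string as an explicit flatten
def pvStep0 (t : Int) (acc : List Char) (p : Int × List Char) : List Char :=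
  let line := if p.1 = 3 + t then PySem.Chars.replace p.2 p.2 [] else p.2
  acc ++ line ++ ['\n']

theorem step0_eval (t : Int) (acc : List Char) (p : Int × List Char) :
    pvStep0 t acc p = acc ++ ((if p.1 = 3 + t then ([] : List Char) else p.2) ++ ['\n']) := by
  unfold pvStep0
  by_cases h : p.1 = 3 + t
  · simp [h, replace_self]
  · simp [h]

theorem foldFirst (t : Int) : ∀ (l : List (Int × List Char)) (acc : List Char),
    l.foldl
      (fun (acc : List Char) (p : Int × List Char) =>
        let line := if p.1 = 3 + t then PySem.Chars.replace p.2 p.2 [] else p.2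
        acc ++ line ++ ['\n']) acc
    = acc ++ (((l.map (fun p => if p.1 = 3 + t then ([] : List Char) else p.2)).map
        (fun l => l ++ ['\n'])).flatten) := by
  intro l
  suffices h : ∀ (l : List (Int × List Char)) (acc : List Char),
      List.foldl (pvStep0 t) acc l
      = acc ++ (((l.map (fun p => if p.1 = 3 + t then ([] : List Char) else p.2)).map
          (fun l => l ++ ['\n'])).flatten) by
    exact fun acc => h l acc
  intro l
  induction l with
  | nil => intro acc; simp
  | cons p rest ih =>
    intro acc
    rw [List.foldl_cons, step0_eval, ih]
    simp

theorem enum_single {α : Type} (x : α) (s : Int) :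
    PySem.List.enumerate [x] s = [(s, x)] := by
  simp [PySem.List.enumerate]

theorem pvOneA_nil (t : Int) (n : Int) : pvOneA t (n, ([] : List Char)) = ([], []) := by
  unfold pvOneA
  have hsl : PySem.List.slice ([] : List Char) (some 0) (some 7) = [] := by
    simp [PySem.List.slice]
  have hno : PySem.Chars.isIn (PySem.Int.toChars t) ([] : List Char) = false :=
    isIn_ne_nil _ (toChars_ne_nil t)
  simp [hsl, hno]

theorem foldl_last (t : Int) (S : List Char × List Int) (q : Int × List Char) :
    List.foldl
      (fun (st : List Char × List Int) (p : Int × List Char) =>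
        let line1 : List Char :=
          if (false : Bool) = true ∧ p.1 = 3 + t then
            PySem.Chars.replace p.2 p.2 (['T','A','G',' '] ++ p.2)
          else p.2
        let r : List Char × List Int :=
          if p.1 > 3 + t then
            if PySem.Chars.isIn (PySem.Int.toChars t) (PySem.List.slice line1 (some 0) (some 7)) = true then
              let r1 : List Char × List Int :=
                if PySem.Chars.isIn (' ' :: (PySem.Int.toChars t ++ [' '])) (PySem.List.slice line1 (some 0) (some 4)) = true then
                  (PySem.Chars.replace line1 line1 [],
                   st.2 ++ [(PySem.Int.ofChars? (PySem.List.slice line1 (some 4) (some 7))).getD 0])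
                else (line1, st.2)
              if PySem.Chars.isIn (' ' :: (PySem.Int.toChars t ++ [' '])) (PySem.List.slice r1.1 (some 4) (some 7)) = true then
                (PySem.Chars.replace r1.1 r1.1 [],
                 r1.2 ++ [(PySem.Int.ofChars? (PySem.List.slice r1.1 (some 0) (some 4))).getD 0])
              else r1
            else (line1, st.2)
          else (line1, st.2)
        (st.1 ++ r.1 ++ ['\n'], r.2))
      S [q]
    = (S.1 ++ (pvOneA t q).1 ++ ['\n'], S.2 ++ (pvOneA t q).2) :=
  stepA_eval t S q

-- ===== VERDICT (by name: the statement is the Claim_ definition above) =====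
theorem delete_connected_atom_and_connections_spec : Claim_equal_delete_connected_atom_and_connections := by
  intro mol t _ _
  unfold Spec_delete_connected_atom_and_connections
  unfold delete_connected_atom_and_connections delete_connected_atom_and_connections_alt
    delete_atom_connections
  simp only []
  have hX : (PySem.Chars.split? mol.toList ['\n']).getD [] = splitNLp [] mol.toList := by
    have h1 : PySem.Chars.split? mol.toList ['\n'] = some (PySem.Chars.splitOn mol.toList ['\n']) := rfl
    rw [h1, Option.getD_some, splitOn_eq_splitNLp]
  -- the enumerated original lines and the lines after the first (blanking) pass
  set E := PySem.List.enumerate ((PySem.Chars.split? mol.toList ['\n']).getD []) 0 with hE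
  set Ls := E.map (fun p => if p.1 = 3 + t then ([] : List Char) else p.2) with hLs
  have hNoNL : ∀ l ∈ Ls, '\n' ∉ l := by
    intro l hl
    rcases List.mem_map.mp hl with ⟨p, hp, rfl⟩
    by_cases h : p.1 = 3 + t
    · simp [h]
    · simp only [h, if_false]
      rw [hE, hX] at hp
      rcases (PySem.List.mem_enumerate_iff _ _ _).mp hp with ⟨k, hk, rfl⟩
      exact mem_splitNLp_no_nl mol.toList [] (by simp) _ (List.getElem_mem hk)
  rw [foldFirst t]
  rw [List.nil_append]
  have hsplit : (PySem.Chars.split? ((Ls.map (fun l => l ++ ['\n'])).flatten) ['\n']).getD []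
      = Ls ++ [[]] := by
    have h1 : PySem.Chars.split? ((Ls.map (fun l => l ++ ['\n'])).flatten) ['\n']
        = some (PySem.Chars.splitOn ((Ls.map (fun l => l ++ ['\n'])).flatten) ['\n']) := rfl
    rw [h1, Option.getD_some, splitOn_eq_splitNLp, splitNLp_flatten Ls hNoNL]
  rw [← hLs, hsplit]
  rw [PySem.List.enumerate_append Ls [[]] 0, enum_single]
  rw [List.foldl_append]
  -- identify the enumerated blanked lines with the mapped enumeration of the originals
  have henumLs : PySem.List.enumerate Ls 0
      = E.map (fun p => (p.1, if p.1 = 3 + t then ([] : List Char) else p.2)) := by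
    rw [hLs, enum_map, hE, enum_enum, List.map_map]
    rfl
  rw [henumLs, foldA_eq t]
  -- the appended empty line of the re-split: A leaves it unchanged
  rw [foldl_last t, pvOneA_nil t]
  rw [foldB_eq t]
  rw [join_append_nil]
  simp
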